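-- pv_equiv track=rewrite | github.com/omzz15/Logic-Game-Solvers | LogicGameSkyscraper.py | generateCombination
-- ===== SOURCE A (Python) =====
-- import itertools
--
-- g_len = 4
--
-- def generateCombination(no):
--     result = []
--     arr = []
--     for i in range(1, g_len+1):
--         arr.append(i)
--     for l in list(itertools.permutations(arr, g_len)):
--         max_no = 0
--         max_cnt = 0
--         for k in l:
--             if k > max_no:
--                 max_no = k
--                 max_cnt += 1
--         if max_cnt == no:
--             result.append(l)
--     return result
-- ===== SOURCE B (Python) =====
-- g_len = 4
--
-- def generateCombination(no):
--     # Recursive backtracking over positions, threading (current max, maxima count);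
--     # remaining values are tried in ascending order to preserve lexicographic order.
--     result = []
--
--     def rec(partial, remaining, cur_max, cnt):
--         if not remaining:
--             if cnt == no:
--                 result.append(tuple(partial))
--             return
--         for i, v in enumerate(remaining):
--             rest = remaining[:i] + remaining[i+1:]
--             if v > cur_max:
--                 rec(partial + [v], rest, v, cnt + 1)
--             else:
--                 rec(partial + [v], rest, cur_max, cnt)
--
--     rec([], list(range(1, g_len + 1)), 0, 0)
--     return result
-- ===== Notes on version B (the rewrite author's own statement) =====
-- stated objective: alternative
-- what changed: Replaces materializing all itertools.permutations and filtering each by a separate maxima-counting pass with a recursive backtracking generator that builds permutations position by position while threading (current max, left-to-right-maxima count) through the recursion.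
import Mathlib
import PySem

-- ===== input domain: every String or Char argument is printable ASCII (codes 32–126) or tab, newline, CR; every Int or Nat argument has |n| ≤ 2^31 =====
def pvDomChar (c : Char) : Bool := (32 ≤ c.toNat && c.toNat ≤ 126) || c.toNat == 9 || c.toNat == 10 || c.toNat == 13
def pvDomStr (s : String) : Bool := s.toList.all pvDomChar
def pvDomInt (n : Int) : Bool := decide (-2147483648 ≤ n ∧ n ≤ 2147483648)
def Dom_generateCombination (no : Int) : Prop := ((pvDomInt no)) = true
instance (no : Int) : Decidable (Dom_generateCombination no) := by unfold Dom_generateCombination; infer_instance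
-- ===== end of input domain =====

-- B replaces the filter over all itertools.permutations by a recursive backtracking
-- generator that threads (current max, left-to-right-maxima count) through the recursion
-- (objective: alternative decomposition, same output).

-- ===== PORT A =====
-- port of itertools.permutations(arr, r): pick each index in order, recurse on the rest
def pvPerms : Nat → List Int → List (List Int)
  | 0, _ => [[]]
  | r + 1, xs =>
      (List.range xs.length).flatMap (fun i =>
        (pvPerms r (xs.eraseIdx i)).map (fun p => xs.getD i 0 :: p))

-- a 4-permutation as the Python tuple (the declared return type)
def pvTup4 (l : List Int) : Int × Int × Int × Int :=
  (l.getD 0 0, l.getD 1 0, l.getD 2 0, l.getD 3 0)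

def generateCombination (no : Int) : List (Int × Int × Int × Int) :=
  let arr := (PySem.List.pyRange 1 (4 + 1) 1).foldl (fun a i => a ++ [i]) []
  (pvPerms 4 arr).foldl (fun result l =>
    let mc := l.foldl (fun (s : Int × Int) k =>
      if k > s.1 then (k, s.2 + 1) else s) (0, 0)
    if mc.2 = no then result ++ [pvTup4 l] else result) []

-- ===== PORT B =====
def pvRec (no : Int) : Nat → List Int → List Int → Int → Int → List (Int × Int × Int × Int)
  | _, part, [], _, cnt => if cnt = no then [pvTup4 part] else []
  | 0, part, _, _, cnt => if cnt = no then [pvTup4 part] else []  -- fuel guard, never reached (fuel = |remaining|)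
  | fuel + 1, part, remaining, curMax, cnt =>
      (List.range remaining.length).flatMap (fun i =>
        let v := remaining.getD i 0
        let rest := remaining.eraseIdx i
        if v > curMax then pvRec no fuel (part ++ [v]) rest v (cnt + 1)
        else pvRec no fuel (part ++ [v]) rest curMax cnt)

def generateCombination_alt (no : Int) : List (Int × Int × Int × Int) :=
  pvRec no 4 [] (PySem.List.pyRange 1 (4 + 1) 1) 0 0

-- ===== PRECONDITION & SPEC =====
def Spec_generateCombination (no : Int) (out : List (Int × Int × Int × Int)) : Prop := out = generateCombination_alt no
instance (no : Int) (out : List (Int × Int × Int × Int)) : Decidable (Spec_generateCombination no out) := by unfold Spec_generateCombination; infer_instance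

-- ===== CLAIM (what is proved, stated in full; the proofs are below) =====
def Claim_equal_generateCombination : Prop := ∀ (no : Int), Dom_generateCombination no → Spec_generateCombination no (generateCombination no)

-- ===== LEMMAS AND PROOFS =====

-- a fold that appends only when P holds adds nothing if P holds nowhere
theorem pv_foldl_nofilter {α β : Type} (P : α → Prop) [DecidablePred P] (g : α → β) :
    ∀ (L : List α) (acc : List β), (∀ l ∈ L, ¬ P l) →
      L.foldl (fun res l => if P l then res ++ [g l] else res) acc = acc := by
  intro L
  induction L with
  | nil => intro acc _; rfl
  | cons a t ih =>
      intro acc h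
      simp only [List.foldl_cons, if_neg (h a (List.mem_cons_self))]
      exact ih acc (fun l hl => h l (List.mem_cons_of_mem a hl))

-- every leaf of the backtracking tree has a maxima count in [cnt, cnt + |remaining|]
theorem pvRec_out_of_range (no : Int) :
    ∀ (fuel : Nat) (part remaining : List Int) (curMax cnt : Int),
      (no < cnt ∨ cnt + remaining.length < no) →
      pvRec no fuel part remaining curMax cnt = [] := by
  intro fuel
  induction fuel with
  | zero =>
      intro part remaining curMax cnt h
      cases remaining with
      | nil => simp only [pvRec]; rw [if_neg]; simp at h; omega
      | cons a t => simp only [pvRec]; rw [if_neg]; simp at h; omega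
  | succ f ih =>
      intro part remaining curMax cnt h
      cases remaining with
      | nil => simp only [pvRec]; rw [if_neg]; simp at h; omega
      | cons a t =>
          simp only [pvRec, List.flatMap_eq_nil_iff]
          intro i hiL
          have hi : i < (a :: t).length := List.mem_range.mp hiL
          have hlen : (((a :: t).eraseIdx i)).length = t.length := by
            rw [List.length_eraseIdx, if_pos hi]
            simp
          simp only [List.length_cons] at h
          split
          · exact ih _ _ _ _ (by rw [hlen]; omega)
          · exact ih _ _ _ _ (by rw [hlen]; omega)

-- ===== VERDICT (by name: the statement is the Claim_ definition above) =====
theorem generateCombination_spec : Claim_equal_generateCombination := by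
  intro no _
  unfold Spec_generateCombination
  by_cases h0 : no = 0
  · subst h0; decide
  by_cases h1 : no = 1
  · subst h1; decide
  by_cases h2 : no = 2
  · subst h2; decide
  by_cases h3 : no = 3
  · subst h3; decide
  by_cases h4 : no = 4
  · subst h4; decide
  · -- no is outside {0,1,2,3,4}: both programs return []
    have hrng : no < 0 ∨ 4 < no := by omega
    have harr : (PySem.List.pyRange 1 (4 + 1) 1).foldl (fun a i => a ++ [i]) [] = [1, 2, 3, 4] := by decide
    have hr : PySem.List.pyRange 1 (4 + 1) 1 = [1, 2, 3, 4] := by decide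
    have hcnt : ∀ l ∈ pvPerms 4 [1, 2, 3, 4],
        1 ≤ (l.foldl (fun (s : Int × Int) k => if k > s.1 then (k, s.2 + 1) else s) (0, 0)).2 ∧
        (l.foldl (fun (s : Int × Int) k => if k > s.1 then (k, s.2 + 1) else s) (0, 0)).2 ≤ 4 := by decide
    have hA : generateCombination no = [] := by
      simp only [generateCombination, harr]
      exact pv_foldl_nofilter
        (fun l => (l.foldl (fun (s : Int × Int) k => if k > s.1 then (k, s.2 + 1) else s) (0, 0)).2 = no)
        pvTup4 _ [] (fun l hl => by have := hcnt l hl; omega)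
    have hB : generateCombination_alt no = [] := by
      rw [generateCombination_alt]
      exact pvRec_out_of_range no 4 [] _ 0 0 (by rw [hr]; simp; omega)
    rw [hA, hB]
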